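-- pv_equiv track=rewrite | github.com/amarinas/algo | random_algo_exercise/hill.py | hill
-- ===== SOURCE A (Python) =====
-- def hill(v):
--     duplicate = sorted(v)
--     max = 0
--
--     for i in range(len(v)):
--         for i in range(len(duplicate)):
--             x = v[i]
--             y = duplicate[i]
--             # print x, y
--
--             if x < y and ((x-y) > max):
--                 max = x - y
--
--             elif x-y >max:
--                 max = x-y
--     return max
-- ===== SOURCE B (Python) =====
-- def hill(v):
--     best = 0
--     run = None
--     for x, y in zip(v, sorted(v)):
--         run = x if run is None else max(run, x)
--         if run - y > best:
--             best = run - y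
--     return best
-- ===== Notes on version B (the rewrite author's own statement) =====
-- stated objective: faster
-- what changed: B fuses everything into one pass over zip(v, sorted(v)) maintaining a running prefix maximum of v and comparing it to the sorted value (correct because sorted(v) is nondecreasing, so the best prefix-max difference equals the best pointwise difference), instead of A's O(n^2) nested index loops rescanning all pointwise differences n times.
import Mathlib
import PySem

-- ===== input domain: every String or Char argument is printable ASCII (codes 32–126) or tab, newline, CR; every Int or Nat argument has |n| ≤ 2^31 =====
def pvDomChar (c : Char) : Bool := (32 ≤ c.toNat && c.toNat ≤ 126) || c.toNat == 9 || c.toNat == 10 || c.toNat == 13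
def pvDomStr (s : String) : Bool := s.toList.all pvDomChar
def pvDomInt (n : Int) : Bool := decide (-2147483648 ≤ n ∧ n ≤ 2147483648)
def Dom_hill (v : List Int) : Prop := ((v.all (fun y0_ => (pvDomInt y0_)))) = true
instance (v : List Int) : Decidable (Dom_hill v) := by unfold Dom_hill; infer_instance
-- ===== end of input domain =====

-- B replaces A's O(n^2) nested index loops by one fused pass over zip(v, sorted(v))
-- maintaining a running prefix maximum of v (objective: faster, asymptotic).

-- ===== PORT A =====
-- Literal port of A: both loops shadow `i`; indices stay in range, so pyGetD is exact here.
def hill (v : List Int) : Int :=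
  let duplicate := PySem.List.sorted v (fun y => y) false
  (PySem.List.pyRange 0 (PySem.List.len v) 1).foldl (fun m _ =>
    (PySem.List.pyRange 0 (PySem.List.len duplicate) 1).foldl (fun m i =>
      let x := PySem.List.pyGetD v i 0
      let y := PySem.List.pyGetD duplicate i 0
      if x < y ∧ x - y > m then x - y
      else if x - y > m then x - y
      else m) m) 0

-- ===== PORT B =====
-- Literal port of Source B: one fold over zip(v, sorted(v)) carrying (best, run);
-- run : Option Int mirrors Python's `None` initialisation.
def hill_alt (v : List Int) : Int :=
  ((v.zip (PySem.List.sorted v (fun y => y) false)).foldl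
    (fun (st : Int × Option Int) (p : Int × Int) =>
      let run' : Int := match st.2 with | none => p.1 | some r => max r p.1
      (if run' - p.2 > st.1 then run' - p.2 else st.1, some run'))
    (0, none)).1

-- ===== PRECONDITION & SPEC =====
def Spec_hill (v : List Int) (out : Int) : Prop := out = hill_alt v
instance (v : List Int) (out : Int) : Decidable (Spec_hill v out) := by unfold Spec_hill; infer_instance

-- ===== CLAIM (what is proved, stated in full; the proofs are below) =====
def Claim_equal_hill : Prop := ∀ (v : List Int), Dom_hill v → Spec_hill v (hill v)

-- ===== LEMMAS AND PROOFS =====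

-- plain pointwise differences v[i] - s[i]
def pdiffs (t u : List Int) : List Int := (t.zip u).map (fun p => p.1 - p.2)

-- differences using a running maximum seeded with r (what B's loop actually compares)
def rdiffs : List Int → List Int → Int → List Int
  | x :: t, y :: u, r => (max r x - y) :: rdiffs t u (max r x)
  | _, _, _ => []

-- A's branch pair collapses: both branches assign x - y, guarded by x - y > m.
theorem hill_body_max (v s : List Int) :
    (fun (m i : Int) =>
      let x := PySem.List.pyGetD v i 0
      let y := PySem.List.pyGetD s i 0
      if x < y ∧ x - y > m then x - y
      else if x - y > m then x - y
      else m)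
    = fun m i => max m (PySem.List.pyGetD v i 0 - PySem.List.pyGetD s i 0) := by
  funext m i
  simp only []
  split_ifs with h1 h2 <;> omega

theorem foldl_max_fix (l : List Int) (a : Int) (h : ∀ y ∈ l, y ≤ a) :
    l.foldl max a = a := by
  induction l with
  | nil => rfl
  | cons x t ih =>
      simp only [List.foldl_cons]
      rw [show max a x = a by have := h x (by simp); omega]
      exact ih (fun y hy => h y (by simp [hy]))

theorem foldl_max_idem (l : List Int) (a : Int) :
    l.foldl max (l.foldl max a) = l.foldl max a := by
  apply foldl_max_fix
  exact (PySem.List.le_foldl_max l a).2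

theorem foldl_const_idem {α : Type} (g : Int → Int) :
    ∀ (l : List α) (a : Int), g a = a → l.foldl (fun m _ => g m) a = a := by
  intro l
  induction l with
  | nil => intro a _; rfl
  | cons x t ih =>
      intro a ha
      simp only [List.foldl_cons]
      rw [ha]
      exact ih a ha

-- the diff list seen through indices equals the zipped diff list
theorem diff_lists_eq (v s : List Int) (hlen : s.length = v.length) :
    (PySem.List.pyRange 0 (v.length) 1).map
        (fun i => PySem.List.pyGetD v i 0 - PySem.List.pyGetD s i 0)
      = pdiffs v s := by
  apply List.ext_getElem
  · simp [PySem.List.length_pyRange_one, pdiffs, hlen]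
  · intro k h1 h2
    have hk : k < v.length := by
      simpa [PySem.List.length_pyRange_one] using h1
    have hks : k < s.length := by omega
    simp [pdiffs, PySem.List.getElem_pyRange_one, PySem.List.pyGetD_eq_getElem,
      List.getElem_zip, Int.toNat_natCast, hk, hks]

-- A computes foldl max 0 over the pointwise differences
theorem hill_eq_foldl (v : List Int) :
    hill v = (pdiffs v (PySem.List.sorted v (fun y => y) false)).foldl max 0 := by
  unfold hill
  set s := PySem.List.sorted v (fun y => y) false with hs
  have hlen : s.length = v.length := by
    rw [hs]; exact PySem.List.length_sorted v _ _
  simp only [PySem.List.len_eq, hill_body_max v s]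
  have hfold : ∀ m : Int,
      (PySem.List.pyRange 0 (s.length : Int) 1).foldl
        (fun m i => max m (PySem.List.pyGetD v i 0 - PySem.List.pyGetD s i 0)) m
      = (pdiffs v s).foldl max m := by
    intro m
    rw [← List.foldl_map, ← diff_lists_eq v s hlen, hlen]
  cases v with
  | nil =>
      have : s = [] := List.eq_nil_of_length_eq_zero (by simp [hlen])
      simp [this, pdiffs]
  | cons a t =>
      have hcons : PySem.List.pyRange 0 ((a :: t).length : Int) 1
          = 0 :: PySem.List.pyRange 1 ((a :: t).length : Int) 1 := by
        apply PySem.List.pyRange_one_cons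
        simp
      rw [hcons]
      simp only [List.foldl_cons, hfold]
      exact foldl_const_idem (fun m => (pdiffs (a :: t) s).foldl max m) _ _
        (foldl_max_idem _ 0)

-- B's loop, once run is some r, is foldl max over the running-max differences
theorem loop_some : ∀ (t u : List Int) (r b : Int),
    ((t.zip u).foldl
      (fun (st : Int × Option Int) (p : Int × Int) =>
        let run' : Int := match st.2 with | none => p.1 | some r => max r p.1
        (if run' - p.2 > st.1 then run' - p.2 else st.1, some run'))
      (b, some r)).1 = (rdiffs t u r).foldl max b := by
  intro t
  induction t with
  | nil => intro u r b; cases u <;> rfl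
  | cons x t ih =>
      intro u r b
      cases u with
      | nil => rfl
      | cons y u =>
          simp only [List.zip_cons_cons, List.foldl_cons, rdiffs]
          rw [show (if max r x - y > b then max r x - y else b) = max b (max r x - y) by
            split <;> omega]
          exact ih u (max r x) (max b (max r x - y))

-- with u nondecreasing and the seed r already dominated (r - head u ≤ b), the running-max
-- differences have the same foldl max as the plain differences
theorem rdiffs_eq_pdiffs_max : ∀ (t u : List Int) (r b : Int),
    u.Pairwise (· ≤ ·) → (∀ y, u.head? = some y → r - y ≤ b) →
    (rdiffs t u r).foldl max b = (pdiffs t u).foldl max b := by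
  intro t
  induction t with
  | nil => intro u r b _ _; cases u <;> rfl
  | cons x t ih =>
      intro u r b hp hhead
      cases u with
      | nil => rfl
      | cons y u =>
          have hry : r - y ≤ b := hhead y rfl
          simp only [rdiffs, pdiffs, List.zip_cons_cons, List.map_cons, List.foldl_cons]
          rw [show max b (max r x - y) = max b (x - y) by omega]
          have hyu : ∀ z ∈ u, y ≤ z := fun z hz => (List.pairwise_cons.mp hp).1 z hz
          refine ih u (max r x) (max b (x - y)) (List.pairwise_cons.mp hp).2 ?_
          intro z hz
          cases u with
          | nil => simp at hz
          | cons y' u' =>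
              have hz' : y' = z := by simpa using hz
              have : y ≤ z := hz' ▸ hyu y' (by simp)
              omega

-- B also computes foldl max 0 over the pointwise differences
theorem hill_alt_eq_foldl (v : List Int) :
    hill_alt v = (pdiffs v (PySem.List.sorted v (fun y => y) false)).foldl max 0 := by
  unfold hill_alt
  set s := PySem.List.sorted v (fun y => y) false with hs
  have hlen : s.length = v.length := by
    rw [hs]; exact PySem.List.length_sorted v _ _
  have hsort : s.Pairwise (· ≤ ·) := by
    rw [hs]; exact PySem.List.sorted_pairwise v (fun y => y) 
  cases v with
  | nil =>
      have : s = [] := List.eq_nil_of_length_eq_zero (by simp [hlen])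
      simp [this, pdiffs]
  | cons x t =>
      obtain ⟨y, u, hsu⟩ : ∃ y u, s = y :: u := by
        cases hsv : s with
        | nil => exfalso; rw [hsv] at hlen; simp at hlen
        | cons y u => exact ⟨y, u, rfl⟩
      rw [hsu]
      rw [hsu] at hsort
      simp only [List.zip_cons_cons, List.foldl_cons, pdiffs, List.map_cons]
      rw [show (if x - y > (0 : Int) then x - y else 0) = max 0 (x - y) by split <;> omega]
      rw [loop_some t u x (max 0 (x - y))]
      refine rdiffs_eq_pdiffs_max t u x (max 0 (x - y))
        (List.pairwise_cons.mp hsort).2 ?_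
      intro z hz
      have : y ≤ z := by
        cases u with
        | nil => simp at hz
        | cons y' u' =>
            have hz' : y' = z := by simpa using hz
            exact hz' ▸ (List.pairwise_cons.mp hsort).1 y' (by simp)
      omega

-- ===== VERDICT (by name: the statement is the Claim_ definition above) =====
theorem hill_spec : Claim_equal_hill := by
  intro v _
  unfold Spec_hill
  rw [hill_eq_foldl, hill_alt_eq_foldl]
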